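-- pv_equiv track=rewrite | github.com/JoshuaDauber/EECE2140-Final-Project | Failed Attempts/main2.py | parseIfs
-- ===== SOURCE A (Python) =====
-- def parseIfs(toks):
--     res = []
--     for i, t in enumerate(toks):
--         if t[1] == 'IF':
--             res.append(t)
--             for t2 in toks[i+1:]:
--                 if t2[1] != 'COLON':
--                     res.append(t2)
--                 else:
--                     break
--         if t[1] == 'WHILE':
--             res.append(t)
--             for t2 in toks[i+1:]:
--                 if t2[1] != 'COLON':
--                     res.append(t2)
--                 else:
--                     break
--     return res
-- ===== SOURCE B (Python) =====
-- def parseIfs(toks):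
--     n = len(toks)
--     # next_colon[j] = smallest index >= j holding a COLON token, or n if none
--     next_colon = [0] * (n + 1)
--     next_colon[n] = n
--     for i in range(n - 1, -1, -1):
--         next_colon[i] = i if toks[i][1] == 'COLON' else next_colon[i + 1]
--     res = []
--     for i, t in enumerate(toks):
--         if t[1] == 'IF' or t[1] == 'WHILE':
--             res += toks[i:next_colon[i + 1]]
--     return res
-- ===== Notes on version B (the rewrite author's own statement) =====
-- stated objective: alternative
-- what changed: B precomputes a next-colon index table in one backward pass and then emits each IF/WHILE span as a single bounded slice toks[i:next_colon[i+1]], instead of A's per-trigger inner rescan over a full copy of the tail (toks[i+1:]); B avoids the O(n) tail copies but a timing run could not measure a difference on generated inputs.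
import Mathlib
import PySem

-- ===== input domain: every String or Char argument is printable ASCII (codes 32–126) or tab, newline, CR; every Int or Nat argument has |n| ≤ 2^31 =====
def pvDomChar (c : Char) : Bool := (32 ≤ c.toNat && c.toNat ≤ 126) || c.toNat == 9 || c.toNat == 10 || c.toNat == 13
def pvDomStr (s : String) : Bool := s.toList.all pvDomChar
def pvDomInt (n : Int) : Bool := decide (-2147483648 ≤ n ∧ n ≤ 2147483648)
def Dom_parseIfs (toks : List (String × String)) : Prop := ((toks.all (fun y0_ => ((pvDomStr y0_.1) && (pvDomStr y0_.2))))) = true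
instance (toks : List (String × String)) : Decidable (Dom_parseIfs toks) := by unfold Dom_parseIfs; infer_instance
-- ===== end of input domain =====

-- B replaces A's nested rescans with a precomputed next-colon index table and one forward pass of slices (alternative decomposition).


-- ===== PORT A =====
-- inner 'for t2 in toks[i+1:]: if t2[1] != 'COLON': append else break'
def grabA : List (String × String) → List (String × String)
  | [] => []
  | t2 :: rest => if t2.2 != "COLON" then t2 :: grabA rest else []

def parseIfs (toks : List (String × String)) : List (String × String) :=
  (PySem.List.enumerate toks 0).foldl
    (fun res it =>
      let res := if it.2.2 == "IF"
        then res ++ [it.2] ++ grabA (PySem.List.slice toks (some (it.1 + 1)) none)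
        else res
      if it.2.2 == "WHILE"
        then res ++ [it.2] ++ grabA (PySem.List.slice toks (some (it.1 + 1)) none)
        else res)
    []

-- ===== PORT B =====
-- backward pass: buildNC toks i = the table next_colon for positions i, i+1, …, i+len (last entry = i+len)
def buildNC : List (String × String) → Nat → List Nat
  | [], i => [i]
  | t :: rest, i =>
      let tail := buildNC rest (i + 1)
      (if t.2 == "COLON" then i else tail.headD (i + 1)) :: tail

def parseIfs_alt (toks : List (String × String)) : List (String × String) :=
  let nc := buildNC toks 0
  (PySem.List.enumerate toks 0).foldl
    (fun res it =>
      if it.2.2 == "IF" || it.2.2 == "WHILE"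
        then res ++ PySem.List.slice toks (some it.1) (some ((nc.getD (it.1.toNat + 1) 0 : Nat) : Int))
        else res)
    []

-- ===== PRECONDITION & SPEC =====
def Spec_parseIfs (toks : List (String × String)) (out : List (String × String)) : Prop := out = parseIfs_alt toks
instance (toks : List (String × String)) (out : List (String × String)) : Decidable (Spec_parseIfs toks out) := by unfold Spec_parseIfs; infer_instance

-- ===== CLAIM (what is proved, stated in full; the proofs are below) =====
def Claim_equal_parseIfs : Prop := ∀ (toks : List (String × String)), Dom_parseIfs toks → Spec_parseIfs toks (parseIfs toks)

-- ===== LEMMAS AND PROOFS =====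

theorem grabA_eq_takeWhile (l : List (String × String)) :
    grabA l = l.takeWhile (fun t2 => t2.2 != "COLON") := by
  induction l with
  | nil => rfl
  | cons t rest ih =>
      by_cases h : (t.2 != "COLON") = true <;>
        simp [grabA, h, ih]

theorem buildNC_length (ts : List (String × String)) (i : Nat) :
    (buildNC ts i).length = ts.length + 1 := by
  induction ts generalizing i with
  | nil => rfl
  | cons t rest ih => simp [buildNC, ih]

theorem buildNC_getD (ts : List (String × String)) (i j : Nat) (hj : j ≤ ts.length) :
    (buildNC ts i).getD j 0 =
      i + j + ((ts.drop j).takeWhile (fun t2 => t2.2 != "COLON")).length := by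
  induction ts generalizing i j with
  | nil =>
      have : j = 0 := Nat.le_zero.mp hj
      subst this
      simp [buildNC]
  | cons t rest ih =>
      cases j with
      | zero =>
          have htail : buildNC rest (i + 1) ≠ [] := by
            have := buildNC_length rest (i + 1)
            intro h; simp [h] at this
          have hhead : (buildNC rest (i + 1)).headD (i + 1)
              = (buildNC rest (i + 1)).getD 0 0 := by
            cases hbc : buildNC rest (i + 1) with
            | nil => exact absurd hbc htail
            | cons a l => simp
          simp only [buildNC, List.getD_cons_zero]
          by_cases hc : t.2 = "COLON"
          · simp [hc]
          · rw [if_neg (by simpa using hc), hhead, ih (i + 1) 0 (Nat.zero_le _)]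
            simp [hc]
            omega
      | succ j' =>
          simp only [buildNC, List.getD_cons_succ]
          rw [ih (i + 1) j' (by simpa using hj)]
          simp
          omega

theorem takeWhile_eq_take_length {α : Type} (p : α → Bool) (l : List α) :
    l.take (l.takeWhile p).length = l.takeWhile p := by
  induction l with
  | nil => rfl
  | cons a l ih =>
      by_cases h : p a <;> simp [h, ih]

-- the common per-token contribution: the IF/WHILE token plus everything up to the next COLON
theorem body_eq (toks : List (String × String)) (k : Nat) (hk : k < toks.length) :
    (if toks[k].2 == "IF" || toks[k].2 == "WHILE"
      then PySem.List.slice toks (some ((0 : Int) + k))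
            (some (((buildNC toks 0).getD (((0 : Int) + k).toNat + 1) 0 : Nat) : Int))
      else [])
    =
    (if toks[k].2 == "IF"
      then toks[k] :: grabA (PySem.List.slice toks (some ((0 : Int) + k + 1)) none)
      else []) ++
    (if toks[k].2 == "WHILE"
      then toks[k] :: grabA (PySem.List.slice toks (some ((0 : Int) + k + 1)) none)
      else []) := by
  have hz : (0 : Int) + (k : Int) = (k : Int) := by ring
  rw [hz]
  have hz1 : (k : Int) + 1 = ((k + 1 : Nat) : Int) := by push_cast; ring
  rw [hz1, PySem.List.slice_from_natCast]
  have htn : ((k : Int)).toNat = k := Int.toNat_natCast k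
  rw [htn]
  set L := ((toks.drop (k + 1)).takeWhile (fun t2 => t2.2 != "COLON")).length with hL
  have hnc : (buildNC toks 0).getD (k + 1) 0 = k + 1 + L := by
    rw [buildNC_getD toks 0 (k + 1) (by omega)]; omega
  rw [hnc, PySem.List.slice_natCast]
  have hdrop : toks.drop k = toks[k] :: toks.drop (k + 1) :=
    List.drop_eq_getElem_cons hk
  have hslice : (toks.drop k).take (k + 1 + L - k)
      = toks[k] :: (toks.drop (k + 1)).takeWhile (fun t2 => t2.2 != "COLON") := by
    rw [hdrop]
    have h1 : k + 1 + L - k = L + 1 := by omega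
    rw [h1, List.take_succ_cons, hL, takeWhile_eq_take_length]
  rw [hslice, grabA_eq_takeWhile]
  by_cases hIF : toks[k].2 == "IF" <;> by_cases hWH : toks[k].2 == "WHILE" <;>
    simp_all

theorem parseIfs_eq_flatMap (toks : List (String × String)) :
    parseIfs toks = (PySem.List.enumerate toks 0).flatMap
      (fun it =>
        (if it.2.2 == "IF"
          then it.2 :: grabA (PySem.List.slice toks (some (it.1 + 1)) none) else []) ++
        (if it.2.2 == "WHILE"
          then it.2 :: grabA (PySem.List.slice toks (some (it.1 + 1)) none) else [])) := by
  unfold parseIfs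
  have hfun : (fun (res : List (String × String)) (it : Int × (String × String)) =>
      let res := if it.2.2 == "IF"
        then res ++ [it.2] ++ grabA (PySem.List.slice toks (some (it.1 + 1)) none)
        else res
      if it.2.2 == "WHILE"
        then res ++ [it.2] ++ grabA (PySem.List.slice toks (some (it.1 + 1)) none)
        else res)
    = (fun res it => res ++
        ((if it.2.2 == "IF"
          then it.2 :: grabA (PySem.List.slice toks (some (it.1 + 1)) none) else []) ++
        (if it.2.2 == "WHILE"
          then it.2 :: grabA (PySem.List.slice toks (some (it.1 + 1)) none) else []))) := by
    funext res it
    by_cases hIF : it.2.2 == "IF" <;> by_cases hWH : it.2.2 == "WHILE" <;>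
      simp [hIF, hWH]
  rw [hfun, PySem.List.foldl_append_eq_flatMap]
  simp

theorem parseIfs_alt_eq_flatMap (toks : List (String × String)) :
    parseIfs_alt toks = (PySem.List.enumerate toks 0).flatMap
      (fun it =>
        if it.2.2 == "IF" || it.2.2 == "WHILE"
          then PySem.List.slice toks (some it.1)
                (some (((buildNC toks 0).getD (it.1.toNat + 1) 0 : Nat) : Int))
          else []) := by
  unfold parseIfs_alt
  dsimp only
  have hfun : (fun (res : List (String × String)) (it : Int × (String × String)) =>
      if it.2.2 == "IF" || it.2.2 == "WHILE"
        then res ++ PySem.List.slice toks (some it.1)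
              (some (((buildNC toks 0).getD (it.1.toNat + 1) 0 : Nat) : Int))
        else res)
    = (fun res it => res ++
        (if it.2.2 == "IF" || it.2.2 == "WHILE"
          then PySem.List.slice toks (some it.1)
                (some (((buildNC toks 0).getD (it.1.toNat + 1) 0 : Nat) : Int))
          else [])) := by
    funext res it
    by_cases h : (it.2.2 == "IF" || it.2.2 == "WHILE") = true <;> simp [h]
  rw [hfun, PySem.List.foldl_append_eq_flatMap]
  simp

-- ===== VERDICT (by name: the statement is the Claim_ definition above) =====
theorem parseIfs_spec : Claim_equal_parseIfs := by
  intro toks _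
  unfold Spec_parseIfs
  rw [parseIfs_eq_flatMap, parseIfs_alt_eq_flatMap]
  apply List.flatMap_congr
  intro it hmem
  obtain ⟨k, hk, rfl⟩ := (PySem.List.mem_enumerate_iff toks 0 it).1 hmem
  exact (body_eq toks k hk).symm
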